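-- pv_equiv track=rewrite | github.com/akkupratap323/MultiPersona-AI-voice-agents | app/utils/validation.py | spell_out_email
-- ===== SOURCE A (Python) =====
-- def spell_out_email(email: str) -> str:
--     """
--     Convert email to spelled-out format for voice confirmation.
--
--     This function helps verify emails character-by-character in voice conversations
--     where STT may mishear characters.
--
--     Args:
--         email: Email address to spell out
--
--     Returns:
--         Spelled-out version with characters separated by hyphens,
--         '@' replaced with 'at', and '.' replaced with 'dot'
--
--     Example:
--         >>> spell_out_email("john@example.com")
--         'j-o-h-n at example dot com'
--         >>> spell_out_email("user.name@company.co.uk")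
--         'u-s-e-r dot n-a-m-e at company dot co dot uk'
--     """
--     if '@' not in email:
--         # If no @ symbol, just spell out the whole thing
--         return '-'.join(list(email))
--
--     # Split at @ symbol
--     local, domain = email.split('@', 1)
--
--     # Spell out local part character by character, including dots
--     local_parts = []
--     current_word = []
--
--     for char in local:
--         if char == '.':
--             if current_word:
--                 local_parts.append('-'.join(current_word))
--                 current_word = []
--             local_parts.append('dot')
--         else:
--             current_word.append(char)
--
--     if current_word:
--         local_parts.append('-'.join(current_word))
--
--     local_spelled = ' '.join(local_parts)
--
--     # Handle domain - replace dots with 'dot'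
--     domain_spelled = domain.replace('.', ' dot ')
--
--     return f"{local_spelled} at {domain_spelled}"
-- ===== SOURCE B (Python) =====
-- def _local_parts(s):
--     head, sep, tail = s.partition('.')
--     parts = ['-'.join(head)] if head else []
--     if not sep:
--         return parts
--     return parts + ['dot'] + _local_parts(tail)
--
--
-- def spell_out_email(email: str) -> str:
--     if '@' in email:
--         local, domain = email.split('@', 1)
--         local_spelled = ' '.join(_local_parts(local))
--         domain_spelled = domain.replace('.', ' dot ')
--         return f"{local_spelled} at {domain_spelled}"
--     return '-'.join(email)
-- ===== Notes on version B (the rewrite author's own statement) =====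
-- stated objective: simpler
-- what changed: A's flush-on-dot character state machine over the local part (parts list plus current_word buffer updated per character) is replaced by a recursive helper that partitions the local part at its first dot, emits the hyphen-joined head (when non-empty) and the spoken separator word, and recurses on the remainder.
import Mathlib
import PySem

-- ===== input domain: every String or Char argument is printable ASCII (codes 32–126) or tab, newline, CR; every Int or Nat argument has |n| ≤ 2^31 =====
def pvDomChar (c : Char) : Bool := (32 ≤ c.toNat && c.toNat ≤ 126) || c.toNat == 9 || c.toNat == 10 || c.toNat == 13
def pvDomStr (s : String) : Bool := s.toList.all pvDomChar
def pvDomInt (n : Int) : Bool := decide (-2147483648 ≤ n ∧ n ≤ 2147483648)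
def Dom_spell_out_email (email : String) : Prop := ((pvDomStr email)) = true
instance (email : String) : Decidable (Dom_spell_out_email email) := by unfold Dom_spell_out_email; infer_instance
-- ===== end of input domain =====

-- B replaces A's flush-on-dot state machine over the local part by a recursive
-- partition-at-the-first-dot decomposition (objective: simpler).

-- ===== PORT A =====
-- '-'.join(current_word) for a word held as a list of characters
def pvHy (w : List Char) : List Char := PySem.Chars.join ['-'] (w.map (fun c => [c]))

-- one iteration of A's "for char in local" loop; state = (local_parts, current_word)
def pvAstep (st : List (List Char) × List Char) (c : Char) : List (List Char) × List Char :=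
  if c = '.' then
    ((if st.2.isEmpty then st.1 else st.1 ++ [pvHy st.2]) ++ [['d','o','t']], [])
  else (st.1, st.2 ++ [c])

def spell_out_email (email : String) : String :=
  if PySem.Str.isIn "@" email = false then
    PySem.Str.join "-" (email.toList.map (fun c => String.ofList [c]))
  else
    let parts := (PySem.Str.splitMax? email "@" 1).getD []
    let lc := (parts.getD 0 "").toList
    let domain := parts.getD 1 ""
    let st := lc.foldl pvAstep ([], [])
    let lp := if st.2.isEmpty then st.1 else st.1 ++ [pvHy st.2]
    String.ofList (PySem.Chars.join [' '] lp ++ (" at ").toList ++ (PySem.Str.replace domain "." " dot ").toList)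

-- ===== PORT B =====
-- predicate "is not a dot" (s.partition('.') = chars before / at / after the first dot)
def pvNd (c : Char) : Bool := c != '.'

-- B's recursive helper _local_parts: partition at the first dot and recurse on the tail
def pvLocalParts (l : List Char) : List (List Char) :=
  match h : l.dropWhile pvNd with
  | [] => if (l.takeWhile pvNd).isEmpty then [] else [pvHy (l.takeWhile pvNd)]
  | _ :: tail =>
      (if (l.takeWhile pvNd).isEmpty then [] else [pvHy (l.takeWhile pvNd)])
        ++ ['d','o','t'] :: pvLocalParts tail
termination_by l.length
decreasing_by
  have hs : (l.dropWhile pvNd).length ≤ l.length := (List.dropWhile_sublist (p := pvNd) (l := l)).length_le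
  rw [h] at hs
  simp at hs
  omega

def spell_out_email_alt (email : String) : String :=
  if PySem.Str.isIn "@" email then
    let parts := (PySem.Str.splitMax? email "@" 1).getD []
    let domain := parts.getD 1 ""
    let local_spelled := PySem.Chars.join [' '] (pvLocalParts (parts.getD 0 "").toList)
    String.ofList (local_spelled ++ (" at ").toList ++ (PySem.Str.replace domain "." " dot ").toList)
  else
    PySem.Str.join "-" (email.toList.map (fun c => String.ofList [c]))

-- ===== PRECONDITION & SPEC =====
def Spec_spell_out_email (email : String) (out : String) : Prop := out = spell_out_email_alt email
instance (email : String) (out : String) : Decidable (Spec_spell_out_email email out) := by unfold Spec_spell_out_email; infer_instance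

-- ===== CLAIM (what is proved, stated in full; the proofs are below) =====
def Claim_equal_spell_out_email : Prop := ∀ (email : String), Dom_spell_out_email email → Spec_spell_out_email email (spell_out_email email)

-- ===== LEMMAS AND PROOFS =====

-- recursive characterisation of A's grouping: the segments of `l` at '.', first one prefixed by `pre`
def pvSplitSpec (pre : List Char) : List Char → List (List Char)
  | [] => [pre]
  | c :: t => if c = '.' then pre :: pvSplitSpec [] t else pvSplitSpec (pre ++ [c]) t

def pvOptW (s : List Char) : List (List Char) := if s.isEmpty then [] else [pvHy s]

def pvTailB (ss : List (List Char)) : List (List Char) :=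
  ss.flatMap (fun s => ['d','o','t'] :: pvOptW s)

def pvBuild : List (List Char) → List (List Char)
  | [] => []
  | s :: rest => pvOptW s ++ pvTailB rest

theorem pvSplitSpec_ne_nil (l : List Char) : ∀ pre, pvSplitSpec pre l ≠ [] := by
  induction l with
  | nil => intro pre; simp [pvSplitSpec]
  | cons c t ih =>
    intro pre
    by_cases hc : c = '.'
    · simp [pvSplitSpec, hc]
    · simp [pvSplitSpec, hc]; exact ih _

theorem pvTailB_cons (s : List Char) (rest : List (List Char)) :
    pvTailB (s :: rest) = ['d','o','t'] :: pvBuild (s :: rest) := by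
  simp [pvTailB, pvBuild, List.flatMap_cons]

theorem pvA_loop (l : List Char) : ∀ (parts : List (List Char)) (cur : List Char),
    (let st := l.foldl pvAstep (parts, cur);
     if st.2.isEmpty then st.1 else st.1 ++ [pvHy st.2])
      = parts ++ pvBuild (pvSplitSpec cur l) := by
  induction l with
  | nil =>
    intro parts cur
    by_cases hc : cur.isEmpty
    · simp [pvSplitSpec, pvBuild, pvOptW, pvTailB, hc]
    · simp [pvSplitSpec, pvBuild, pvOptW, pvTailB, hc]
  | cons c t ih =>
    intro parts cur
    by_cases hc : c = '.'
    · subst hc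
      simp only [List.foldl_cons, pvAstep]
      rw [ih]
      obtain ⟨s0, rest, hsr⟩ : ∃ s0 rest, pvSplitSpec ([] : List Char) t = s0 :: rest := by
        cases hss : pvSplitSpec ([] : List Char) t with
        | nil => exact absurd hss (pvSplitSpec_ne_nil t [])
        | cons a b => exact ⟨a, b, rfl⟩
      by_cases hcur : cur.isEmpty
      · simp [pvSplitSpec, pvBuild, pvOptW, hcur, hsr, pvTailB_cons]
      · simp [pvSplitSpec, pvBuild, pvOptW, hcur, hsr, pvTailB_cons]
    · simp only [List.foldl_cons, pvAstep, if_neg hc]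
      rw [ih parts (cur ++ [c])]
      simp [pvSplitSpec, hc]

-- pvSplitSpec expressed through take/drop at the first dot (the shape of B's recursion)
theorem pvSplitSpec_span (l : List Char) : ∀ pre,
    pvSplitSpec pre l =
      (match l.dropWhile pvNd with
       | [] => [pre ++ l.takeWhile pvNd]
       | _ :: tail => (pre ++ l.takeWhile pvNd) :: pvSplitSpec [] tail) := by
  induction l with
  | nil => intro pre; simp [pvSplitSpec]
  | cons c t ih =>
    intro pre
    by_cases hc : c = '.'
    · subst hc
      simp [pvSplitSpec, pvNd]
    · have hnd : pvNd c = true := by simp [pvNd, hc]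
      simp only [pvSplitSpec, if_neg hc, List.dropWhile_cons, List.takeWhile_cons, hnd]
      rw [ih (pre ++ [c])]
      cases hdt : t.dropWhile pvNd <;> simp

-- B's recursion computes exactly the assembled form of A's segments
theorem pvParts_eq (l : List Char) : pvLocalParts l = pvBuild (pvSplitSpec [] l) := by
  induction l using pvLocalParts.induct with
  | case1 l h hemp =>
    rw [pvLocalParts, pvSplitSpec_span, h]
    simp [pvBuild, pvOptW, pvTailB, hemp]
  | case2 l h hemp =>
    rw [pvLocalParts, pvSplitSpec_span, h]
    simp [pvBuild, pvOptW, pvTailB, hemp]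
  | case3 l c tail h ih =>
    rw [pvLocalParts, pvSplitSpec_span, h]
    obtain ⟨s0, rest, hsr⟩ : ∃ s0 rest, pvSplitSpec ([] : List Char) tail = s0 :: rest := by
      cases hss : pvSplitSpec ([] : List Char) tail with
      | nil => exact absurd hss (pvSplitSpec_ne_nil tail [])
      | cons a b => exact ⟨a, b, rfl⟩
    simp [pvBuild, pvOptW, pvTailB_cons, hsr, ih]

-- the two local-part computations agree on every string of characters
theorem pvLocal_eq (lc : List Char) :
    (if (lc.foldl pvAstep ([], [])).2.isEmpty then (lc.foldl pvAstep ([], [])).1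
     else (lc.foldl pvAstep ([], [])).1 ++ [pvHy (lc.foldl pvAstep ([], [])).2])
      = pvLocalParts lc := by
  rw [pvParts_eq]
  simpa using pvA_loop lc [] []

-- ===== VERDICT (by name: the statement is the Claim_ definition above) =====
theorem spell_out_email_spec : Claim_equal_spell_out_email := by
  intro email _
  unfold Spec_spell_out_email spell_out_email spell_out_email_alt
  cases h : PySem.Str.isIn "@" email with
  | true =>
    rw [if_neg (show ¬(true = false) by decide), if_pos rfl]
    dsimp only
    rw [pvLocal_eq]
  | false => rw [if_pos rfl, if_neg (show ¬(false = true) by decide)]
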